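-- pv_equiv track=rewrite | github.com/loudsheep/matura | informatyka/zbiur_zadan/rozw/74/rozw.py | check_ascii
-- ===== SOURCE A (Python) =====
-- def is_frag_ascii(f):
--     f = "".join(sorted(list(f)))
--
--     for c in range(len(f) - 1):
--         if ord(f[c + 1]) - ord(f[c]) != 1:
--             return False
--
--     return True
--
-- def check_ascii(h):
--     if len(h) < 4:
--         return False
--
--     for i in range(len(h) - 4 + 1):
--         frag = h[i:(i+4)]
--         if is_frag_ascii(frag):
--             return True
--
--     return False
-- ===== SOURCE B (Python) =====
-- def check_ascii(h):
--     return any(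
--         len(set(w)) == 4 and ord(max(w)) - ord(min(w)) == 3
--         for w in (h[i:i + 4] for i in range(len(h) - 3))
--     )
-- ===== Notes on version B (the rewrite author's own statement) =====
-- stated objective: simpler
-- what changed: Replaced the sort-then-adjacent-difference helper (and the explicit short-length guard) with a single any(...) over 4-char windows deciding consecutiveness by set distinctness plus ordinal range (max-min == 3); no sorting or joining is performed.
import Mathlib
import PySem

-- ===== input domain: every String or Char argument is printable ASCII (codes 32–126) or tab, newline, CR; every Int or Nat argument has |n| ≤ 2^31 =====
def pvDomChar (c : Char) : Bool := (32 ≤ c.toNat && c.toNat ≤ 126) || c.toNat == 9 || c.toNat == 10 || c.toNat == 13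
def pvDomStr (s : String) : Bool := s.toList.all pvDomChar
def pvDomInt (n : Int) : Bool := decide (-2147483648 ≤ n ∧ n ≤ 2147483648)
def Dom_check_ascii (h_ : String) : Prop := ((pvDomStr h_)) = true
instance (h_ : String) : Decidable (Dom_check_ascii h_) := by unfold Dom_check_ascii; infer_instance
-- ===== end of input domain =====

-- B replaces A's sort-and-adjacent-difference helper (plus length guard) with one any(...)
-- over the 4-char windows testing set distinctness and ordinal range; objective: simpler.

-- ===== PORT A =====
def is_frag_ascii (f : List Char) : Bool :=
  let s := PySem.List.sorted f (fun x => x)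
  (PySem.List.pyRange 0 ((s.length : Int) - 1)).foldl
    (fun ok c =>
      if ((PySem.List.pyGetD s (c + 1) ' ').toNat : Int) - ((PySem.List.pyGetD s c ' ').toNat : Int) ≠ 1
      then false else ok)
    true

def check_ascii (h_ : String) : Bool :=
  let h := h_.toList
  if h.length < 4 then false
  else
    (PySem.List.pyRange 0 ((h.length : Int) - 4 + 1)).foldl
      (fun found i =>
        if is_frag_ascii (PySem.List.slice h (some i) (some (i + 4))) then true else found)
      false

-- ===== PORT B =====
def check_ascii_alt (h_ : String) : Bool :=
  let h := h_.toList
  (PySem.List.pyRange 0 ((h.length : Int) - 3)).any fun i =>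
    let w := PySem.List.slice h (some i) (some (i + 4))
    (PySem.Set.ofList w).length == 4 &&
      match PySem.List.max? w (fun x => x), PySem.List.min? w (fun x => x) with
      | some mx, some mn => decide ((mx.toNat : Int) - (mn.toNat : Int) = 3)
      | _, _ => false

-- ===== PRECONDITION & SPEC =====
def Spec_check_ascii (h_ : String) (out : Bool) : Prop := out = check_ascii_alt h_
instance (h_ : String) (out : Bool) : Decidable (Spec_check_ascii h_ out) := by unfold Spec_check_ascii; infer_instance

-- ===== CLAIM (what is proved, stated in full; the proofs are below) =====
def Claim_equal_check_ascii : Prop := ∀ (h_ : String), Dom_check_ascii h_ → Spec_check_ascii h_ (check_ascii h_)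

-- ===== LEMMAS AND PROOFS =====

-- B's per-window test, named for the proofs below.
def altTest (w : List Char) : Bool :=
  (PySem.Set.ofList w).length == 4 &&
    match PySem.List.max? w (fun x => x), PySem.List.min? w (fun x => x) with
    | some mx, some mn => decide ((mx.toNat : Int) - (mn.toNat : Int) = 3)
    | _, _ => false

-- set(w) has 4 elements iff the 4-element list w has no duplicates
lemma ofList_len_four (w : List Char) (hw : w.length = 4) :
    ((PySem.Set.ofList w).length == 4) = decide w.Nodup := by
  have hperm : (PySem.Set.ofList w).Perm w.dedup := by
    refine (List.perm_ext_iff_of_nodup (PySem.Set.nodup_ofList w) w.nodup_dedup).mpr ?_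
    intro x; rw [PySem.Set.mem_ofList, List.mem_dedup]
  have hlen : (PySem.Set.ofList w).length = w.dedup.length := hperm.length_eq
  by_cases hnd : w.Nodup
  · simp [hlen, List.dedup_eq_self.mpr hnd, hw, hnd]
  · have hsub : w.dedup.Sublist w := w.dedup_sublist
    have hne : w.dedup ≠ w := fun h => hnd (by rw [← h]; exact w.nodup_dedup)
    have hlt : w.dedup.length < w.length :=
      lt_of_le_of_ne hsub.length_le (fun h => hne (hsub.eq_of_length h))
    rw [hlen]
    simp [hnd]
    omega

-- Char order/equality moved to code points, for omega
lemma char_toNat_le {a b : Char} (h : a ≤ b) : a.toNat ≤ b.toNat := Fin.mk_le_mk.mp h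

lemma char_eq_of_toNat {a b : Char} (h : a.toNat = b.toNat) : a = b :=
  Char.ext (UInt32.toNat_inj.mp h)

-- the core per-window fact: A's sorted-adjacent test equals B's set/range test on 4-char windows
lemma frag_eq (w : List Char) (hw : w.length = 4) : is_frag_ascii w = altTest w := by
  have hperm := PySem.List.sorted_perm w (fun x => x) false
  have hpair := PySem.List.sorted_pairwise w (fun x => x)
  have hlen : (PySem.List.sorted w (fun x => x)).length = 4 := hperm.length_eq.trans hw
  obtain ⟨m, hm⟩ : ∃ m, PySem.List.max? w (fun x => x) = some m := by
    rcases hmo : PySem.List.max? w (fun x => x) with _ | m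
    · exfalso
      have := (PySem.List.max?_eq_none_iff w (fun x => x)).mp hmo
      simp [this] at hw
    · exact ⟨m, rfl⟩
  obtain ⟨mn, hmn⟩ : ∃ mn, PySem.List.min? w (fun x => x) = some mn := by
    rcases hmo : PySem.List.min? w (fun x => x) with _ | mn
    · exfalso
      have := (PySem.List.min?_eq_none_iff w (fun x => x)).mp hmo
      simp [this] at hw
    · exact ⟨mn, rfl⟩
  rcases hs : PySem.List.sorted w (fun x => x) with _ | ⟨a, _ | ⟨b, _ | ⟨c, _ | ⟨d, _ | _⟩⟩⟩⟩ <;>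
    simp [hs] at hlen
  rw [hs] at hperm hpair
  -- chain inequalities from sortedness
  simp only [List.pairwise_cons, List.mem_cons, List.not_mem_nil] at hpair
  have hab : a.toNat ≤ b.toNat := char_toNat_le (hpair.1 b (by simp))
  have hbc : b.toNat ≤ c.toNat := char_toNat_le (hpair.2.1 c (by simp))
  have hcd : c.toNat ≤ d.toNat := char_toNat_le (hpair.2.2.1 d (by simp))
  -- max is d, min is a
  have hdw : d ∈ w := hperm.mem_iff.mp (by simp)
  have haw : a ∈ w := hperm.mem_iff.mp (by simp)
  have hmw : m = a ∨ m = b ∨ m = c ∨ m = d := by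
    simpa using hperm.mem_iff.mpr (PySem.List.max?_mem hm)
  have hmd : m = d := by
    apply char_eq_of_toNat
    have h1 : m.toNat ≤ d.toNat := by
      rcases hmw with h | h | h | h <;> subst h <;> omega
    have h2 : d.toNat ≤ m.toNat := char_toNat_le (PySem.List.max?_isMax hm d hdw)
    omega
  have hmnw : mn = a ∨ mn = b ∨ mn = c ∨ mn = d := by
    simpa using hperm.mem_iff.mpr (PySem.List.min?_mem hmn)
  have hmna : mn = a := by
    apply char_eq_of_toNat
    have h1 : a.toNat ≤ mn.toNat := by
      rcases hmnw with h | h | h | h <;> subst h <;> omega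
    have h2 : mn.toNat ≤ a.toNat := char_toNat_le (PySem.List.min?_isMin hmn a haw)
    omega
  -- unfold both sides
  simp only [is_frag_ascii, altTest, hs, hm, hmn, hmd, hmna]
  have e1 : ((([a, b, c, d] : List Char).length : Int) - 1) = 3 := by simp
  have hnd : decide w.Nodup = decide (([a, b, c, d] : List Char).Nodup) :=
    decide_eq_decide.mpr hperm.nodup_iff.symm
  rw [e1, show PySem.List.pyRange 0 3 = [0, 1, 2] from by decide,
     ofList_len_four w hw, hnd]
  simp only [List.foldl,
    show PySem.List.pyGetD [a, b, c, d] (0 + 1) ' ' = b from rfl,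
    show PySem.List.pyGetD [a, b, c, d] (1 + 1) ' ' = c from rfl,
    show PySem.List.pyGetD [a, b, c, d] (2 + 1) ' ' = d from rfl,
    show PySem.List.pyGetD [a, b, c, d] 0 ' ' = a from rfl,
    show PySem.List.pyGetD [a, b, c, d] 1 ' ' = b from rfl,
    show PySem.List.pyGetD [a, b, c, d] 2 ' ' = c from rfl,
    List.nodup_cons, List.mem_cons, List.not_mem_nil]
  -- now pure propositional/arithmetic content over code points
  have inj : ∀ x y : Char, x = y ↔ x.toNat = y.toNat :=
    fun x y => ⟨fun h => h ▸ rfl, char_eq_of_toNat⟩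
  rw [Bool.eq_iff_iff]
  simp only [Bool.and_eq_true, decide_eq_true_eq, apply_ite (· = true), inj]
  split_ifs with h1 h2 h3 <;>
    simp only [false_iff, true_iff, List.nodup_nil, not_false_eq_true, and_true,
      or_false, not_or, not_and] <;>
    omega

-- every window the loops visit has exactly 4 characters
lemma slice_len_four (l : List Char) (k : Nat) (hk : (k : Int) < (l.length : Int) - 3) :
    (PySem.List.slice l (some (k : Int)) (some ((k : Int) + 4))).length = 4 := by
  have h4 : ((k + 4 : Nat) : Int) = (k : Int) + 4 := by push_cast; ring
  rw [← h4, PySem.List.slice_natCast l k (k + 4)]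
  have hkn : k + 4 ≤ l.length := by omega
  simp [List.length_take, List.length_drop]
  omega

theorem check_ascii_spec : Claim_equal_check_ascii := by
  intro h_ _
  unfold Spec_check_ascii check_ascii check_ascii_alt
  by_cases hl : h_.toList.length < 4
  · have hl' : h_.length < 4 := by simpa using hl
    have hempty : PySem.List.pyRange 0 ((h_.length : Int) - 3) = [] :=
      PySem.List.pyRange_one_eq_nil (by omega)
    simp [hl', hempty]
  · have hb : ((h_.toList.length : Int) - 4 + 1) = (h_.toList.length : Int) - 3 := by ring
    simp only [hl, if_false, hb,
      PySem.List.foldl_if_true_eq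
        (fun i => is_frag_ascii (PySem.List.slice h_.toList (some i) (some (i + 4)))),
      Bool.false_or]
    refine PySem.List.any_congr_mem ?_
    intro i hi
    rw [PySem.List.mem_pyRange_one] at hi
    obtain ⟨k, rfl⟩ := Int.eq_ofNat_of_zero_le hi.1
    exact frag_eq _ (slice_len_four h_.toList k hi.2)
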